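-- pv_equiv track=rewrite | github.com/shareui/plugins | plugins/plnfsrch.py | findPluginsByPartialMatch
-- ===== SOURCE A (Python) =====
-- def findPluginsByPartialMatch(pluginsDatabase, searchQuery):
--     matches = []
--     searchLower = searchQuery.lower()
--
--     for pluginKey, pluginData in pluginsDatabase.items():
--         pluginName = pluginData.get("displayName", pluginKey).lower()
--
--         if searchLower in pluginKey.lower():
--             matches.append((pluginKey, pluginData, 2))
--         elif searchLower in pluginName:
--             matches.append((pluginKey, pluginData, 1))
--
--     matches.sort(key=lambda x: x[2], reverse=True)
--     return [(key, data) for key, data, _ in matches]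
-- ===== SOURCE B (Python) =====
-- def findPluginsByPartialMatch(pluginsDatabase, searchQuery):
--     q = searchQuery.lower()
--     primary = []
--     secondary = []
--     for key, data in pluginsDatabase.items():
--         if q in key.lower():
--             primary.append((key, data))
--         elif q in data.get("displayName", key).lower():
--             secondary.append((key, data))
--     return primary + secondary
-- ===== Notes on version B (the rewrite author's own statement) =====
-- stated objective: simpler
-- what changed: replaces the score-tag-then-stable-sort pipeline with a single pass into two buckets (key matches, then display-name matches) concatenated at the end, so no scores and no sort exist at all
import Mathlib
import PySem

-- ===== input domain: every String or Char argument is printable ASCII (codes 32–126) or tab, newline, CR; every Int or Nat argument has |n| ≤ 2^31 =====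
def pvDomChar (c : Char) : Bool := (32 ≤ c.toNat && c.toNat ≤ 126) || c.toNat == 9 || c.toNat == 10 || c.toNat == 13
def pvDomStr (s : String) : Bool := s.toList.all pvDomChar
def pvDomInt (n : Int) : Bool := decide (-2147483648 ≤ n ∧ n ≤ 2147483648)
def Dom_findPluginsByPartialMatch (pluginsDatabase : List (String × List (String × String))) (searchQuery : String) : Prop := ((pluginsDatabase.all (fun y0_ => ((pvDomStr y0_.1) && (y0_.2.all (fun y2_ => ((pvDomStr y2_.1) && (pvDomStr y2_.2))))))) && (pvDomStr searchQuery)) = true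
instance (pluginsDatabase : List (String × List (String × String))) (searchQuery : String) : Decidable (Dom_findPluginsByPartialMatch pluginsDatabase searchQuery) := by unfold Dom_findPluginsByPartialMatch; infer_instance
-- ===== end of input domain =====

-- B replaces A's tag-with-score-then-stable-sort with one pass into two buckets concatenated at the end (simpler; no sort).

-- ===== PORT A =====
def findPluginsByPartialMatch (pluginsDatabase : List (String × List (String × String))) (searchQuery : String) : List (String × (List (String × String))) :=
  let searchLower := PySem.Str.lower searchQuery
  let matchesList := (PySem.Dict.ofList pluginsDatabase).items.foldl
    (fun (m : List (String × List (String × String) × Int)) kv =>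
      let pluginKey := kv.1
      let pluginData := PySem.Dict.ofList kv.2
      let pluginName := PySem.Str.lower (pluginData.getD "displayName" pluginKey)
      if PySem.Str.isIn searchLower (PySem.Str.lower pluginKey) then m ++ [(pluginKey, pluginData.items, 2)]
      else if PySem.Str.isIn searchLower pluginName then m ++ [(pluginKey, pluginData.items, 1)]
      else m) []
  (PySem.List.sorted matchesList (fun x => x.2.2) true).map (fun x => (x.1, x.2.1))

-- ===== PORT B =====
def findPluginsByPartialMatch_alt (pluginsDatabase : List (String × List (String × String))) (searchQuery : String) : List (String × (List (String × String))) :=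
  let q := PySem.Str.lower searchQuery
  let acc := (PySem.Dict.ofList pluginsDatabase).items.foldl
    (fun (acc : List (String × List (String × String)) × List (String × List (String × String))) kv =>
      let key := kv.1
      let d := PySem.Dict.ofList kv.2
      if PySem.Str.isIn q (PySem.Str.lower key) then (acc.1 ++ [(key, d.items)], acc.2)
      else if PySem.Str.isIn q (PySem.Str.lower (d.getD "displayName" key)) then (acc.1, acc.2 ++ [(key, d.items)])
      else acc)
    ([], [])
  acc.1 ++ acc.2

-- ===== PRECONDITION & SPEC =====
def Spec_findPluginsByPartialMatch (pluginsDatabase : List (String × List (String × String))) (searchQuery : String) (out : List (String × (List (String × String)))) : Prop := out = findPluginsByPartialMatch_alt pluginsDatabase searchQuery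
instance (pluginsDatabase : List (String × List (String × String))) (searchQuery : String) (out : List (String × (List (String × String)))) : Decidable (Spec_findPluginsByPartialMatch pluginsDatabase searchQuery out) := by unfold Spec_findPluginsByPartialMatch; infer_instance

-- ===== CLAIM (what is proved, stated in full; the proofs are below) =====
def Claim_equal_findPluginsByPartialMatch : Prop := ∀ (pluginsDatabase : List (String × List (String × String))) (searchQuery : String), Dom_findPluginsByPartialMatch pluginsDatabase searchQuery → Spec_findPluginsByPartialMatch pluginsDatabase searchQuery (findPluginsByPartialMatch pluginsDatabase searchQuery)

-- ===== LEMMAS AND PROOFS =====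

-- item = one (key, raw inner association list) entry; the classification both loops share
def pvC2 (q : String) (kv : String × List (String × String)) : Bool :=
  PySem.Str.isIn q (PySem.Str.lower kv.1)
def pvC1 (q : String) (kv : String × List (String × String)) : Bool :=
  PySem.Str.isIn q (PySem.Str.lower ((PySem.Dict.ofList kv.2).getD "displayName" kv.1))
def pvT (kv : String × List (String × String)) : String × List (String × String) :=
  (kv.1, (PySem.Dict.ofList kv.2).items)
def pvG (q : String) (kv : String × List (String × String)) : List (String × List (String × String) × Int) :=
  if pvC2 q kv then [(kv.1, (PySem.Dict.ofList kv.2).items, 2)]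
  else if pvC1 q kv then [(kv.1, (PySem.Dict.ofList kv.2).items, 1)]
  else []
def pvG2 (q : String) (kv : String × List (String × String)) : List (String × List (String × String)) :=
  if pvC2 q kv then [pvT kv] else []
def pvG1 (q : String) (kv : String × List (String × String)) : List (String × List (String × String)) :=
  if pvC2 q kv then [] else if pvC1 q kv then [pvT kv] else []

lemma stepA (q : String) (kv : String × List (String × String))
    (m : List (String × List (String × String) × Int)) :
    (let pluginKey := kv.1
     let pluginData := PySem.Dict.ofList kv.2
     let pluginName := PySem.Str.lower (pluginData.getD "displayName" pluginKey)
     if PySem.Str.isIn q (PySem.Str.lower pluginKey) then m ++ [(pluginKey, pluginData.items, 2)]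
     else if PySem.Str.isIn q pluginName then m ++ [(pluginKey, pluginData.items, 1)]
     else m)
    = m ++ pvG q kv := by
  simp only [pvG, pvC2, pvC1]
  split_ifs <;> simp

lemma loopA_eq_flatMap (q : String) (L : List (String × List (String × String))) :
    L.foldl
      (fun (m : List (String × List (String × String) × Int)) kv =>
        let pluginKey := kv.1
        let pluginData := PySem.Dict.ofList kv.2
        let pluginName := PySem.Str.lower (pluginData.getD "displayName" pluginKey)
        if PySem.Str.isIn q (PySem.Str.lower pluginKey) then m ++ [(pluginKey, pluginData.items, 2)]
        else if PySem.Str.isIn q pluginName then m ++ [(pluginKey, pluginData.items, 1)]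
        else m) []
    = L.flatMap (pvG q) := by
  rw [PySem.List.foldl_congr_mem L _ (fun m kv => m ++ pvG q kv) [] (fun m kv _ => stepA q kv m)]
  exact PySem.List.foldl_append_eq_flatMap _ _ _

lemma stepB (q : String) (kv : String × List (String × String))
    (acc : List (String × List (String × String)) × List (String × List (String × String))) :
    (let key := kv.1
     let d := PySem.Dict.ofList kv.2
     if PySem.Str.isIn q (PySem.Str.lower key) then (acc.1 ++ [(key, d.items)], acc.2)
     else if PySem.Str.isIn q (PySem.Str.lower (d.getD "displayName" key)) then (acc.1, acc.2 ++ [(key, d.items)])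
     else acc)
    = (acc.1 ++ pvG2 q kv, acc.2 ++ pvG1 q kv) := by
  simp only [pvG2, pvG1, pvC2, pvC1, pvT]
  split_ifs <;> simp

lemma loopB_eq (q : String) (L : List (String × List (String × String)))
    (p s : List (String × List (String × String))) :
    L.foldl
      (fun (acc : List (String × List (String × String)) × List (String × List (String × String))) kv =>
        let key := kv.1
        let d := PySem.Dict.ofList kv.2
        if PySem.Str.isIn q (PySem.Str.lower key) then (acc.1 ++ [(key, d.items)], acc.2)
        else if PySem.Str.isIn q (PySem.Str.lower (d.getD "displayName" key)) then (acc.1, acc.2 ++ [(key, d.items)])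
        else acc)
      (p, s)
    = (p ++ L.flatMap (pvG2 q), s ++ L.flatMap (pvG1 q)) := by
  induction L generalizing p s with
  | nil => simp
  | cons kv L ih =>
    rw [List.foldl_cons, List.flatMap_cons, List.flatMap_cons]
    have h := stepB q kv (p, s)
    dsimp only at h ⊢
    rw [h, ih, List.append_assoc, List.append_assoc]

lemma proj2_flatMap (q : String) (L : List (String × List (String × String))) :
    ((L.flatMap (pvG q)).filter (fun x => x.2.2 == (2 : Int))).map (fun x => (x.1, x.2.1))
      = L.flatMap (pvG2 q) := by
  induction L with
  | nil => simp
  | cons kv L ih =>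
    simp only [List.flatMap_cons, List.filter_append, List.map_append, ih]
    congr 1
    simp only [pvG, pvG2, pvT]
    split_ifs <;> simp

lemma proj1_flatMap (q : String) (L : List (String × List (String × String))) :
    ((L.flatMap (pvG q)).filter (fun x => x.2.2 == (1 : Int))).map (fun x => (x.1, x.2.1))
      = L.flatMap (pvG1 q) := by
  induction L with
  | nil => simp
  | cons kv L ih =>
    simp only [List.flatMap_cons, List.filter_append, List.map_append, ih]
    congr 1
    simp only [pvG, pvG1, pvT]
    split_ifs <;> simp

lemma scores_flatMap (q : String) (L : List (String × List (String × String))) :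
    ∀ x ∈ L.flatMap (pvG q), x.2.2 = (2 : Int) ∨ x.2.2 = 1 := by
  intro x hx
  rcases List.mem_flatMap.1 hx with ⟨kv, _, hx⟩
  simp only [pvG] at hx
  split_ifs at hx <;> simp_all

lemma insertBy_two {α : Type} (key : α → Int) (x : α) (hx : key x = 2) :
    ∀ (pre2 pre1 : List α), (∀ y ∈ pre2, key y = 2) → (∀ y ∈ pre1, key y = 1) →
    PySem.List.insertBy (fun a b => decide (key b < key a)) x (pre2 ++ pre1)
      = pre2 ++ x :: pre1 := by
  intro pre2
  induction pre2 with
  | nil =>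
    intro pre1 _ h1
    cases pre1 with
    | nil => simp [PySem.List.insertBy]
    | cons y ys =>
      have : key y = 1 := h1 y (by simp)
      simp [PySem.List.insertBy, this, hx]
  | cons z zs ih =>
    intro pre1 h2 h1
    have hz : key z = 2 := h2 z (by simp)
    have hstep : PySem.List.insertBy (fun a b => decide (key b < key a)) x (z :: (zs ++ pre1))
        = z :: PySem.List.insertBy (fun a b => decide (key b < key a)) x (zs ++ pre1) := by
      simp [PySem.List.insertBy, hz, hx]
    rw [List.cons_append, hstep, ih pre1 (fun y hy => h2 y (List.mem_cons_of_mem z hy)) h1,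
      List.cons_append]

lemma foldl_insertBy_two {α : Type} (key : α → Int) :
    ∀ (m pre2 pre1 : List α), (∀ x ∈ m, key x = 2 ∨ key x = 1) →
    (∀ y ∈ pre2, key y = 2) → (∀ y ∈ pre1, key y = 1) →
    m.foldl (fun acc x => PySem.List.insertBy (fun a b => decide (key b < key a)) x acc) (pre2 ++ pre1)
      = (pre2 ++ m.filter (fun x => key x == 2)) ++ (pre1 ++ m.filter (fun x => key x == 1)) := by
  intro m
  induction m with
  | nil => intro pre2 pre1 _ _ _; simp
  | cons x m ih =>
    intro pre2 pre1 hm h2 h1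
    rcases hm x (by simp) with hx | hx
    · rw [List.foldl_cons, insertBy_two key x hx pre2 pre1 h2 h1,
        show pre2 ++ x :: pre1 = (pre2 ++ [x]) ++ pre1 by simp]
      have h2' : ∀ y ∈ pre2 ++ [x], key y = 2 := by
        intro y hy
        rcases List.mem_append.1 hy with h | h
        · exact h2 y h
        · simp_all
      rw [ih (pre2 ++ [x]) pre1 (fun y hy => hm y (List.mem_cons_of_mem x hy)) h2' h1]
      simp only [List.filter_cons, hx]
      have e2 : ((2 : Int) == 2) = true := by decide
      have e1 : ((2 : Int) == 1) = false := by decide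
      simp [e2, e1]
    · have hnb : ∀ y ∈ pre2 ++ pre1, (decide (key y < key x)) = false := by
        intro y hy
        rcases List.mem_append.1 hy with h | h
        · have := h2 y h; simp [this, hx]
        · have := h1 y h; simp [this, hx]
      rw [List.foldl_cons, PySem.List.insertBy_of_forall_not_before _ x (pre2 ++ pre1) hnb,
        show (pre2 ++ pre1) ++ [x] = pre2 ++ (pre1 ++ [x]) by simp]
      have h1' : ∀ y ∈ pre1 ++ [x], key y = 1 := by
        intro y hy
        rcases List.mem_append.1 hy with h | h
        · exact h1 y h
        · simp_all
      rw [ih pre2 (pre1 ++ [x]) (fun y hy => hm y (List.mem_cons_of_mem x hy)) h2 h1']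
      simp only [List.filter_cons, hx]
      have e2 : ((1 : Int) == 2) = false := by decide
      have e1 : ((1 : Int) == 1) = true := by decide
      simp [e2, e1]

lemma sorted_two {α : Type} (key : α → Int) (m : List α)
    (h : ∀ x ∈ m, key x = 2 ∨ key x = 1) :
    PySem.List.sorted m key true
      = m.filter (fun x => key x == 2) ++ m.filter (fun x => key x == 1) := by
  rw [PySem.List.sorted_rev_eq_foldl_insertBy]
  have := foldl_insertBy_two key m [] [] h (by simp) (by simp)
  simpa using this

-- ===== VERDICT (by name: the statement is the Claim_ definition above) =====
theorem findPluginsByPartialMatch_spec : Claim_equal_findPluginsByPartialMatch := by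
  intro db q _
  unfold Spec_findPluginsByPartialMatch
  have hA : findPluginsByPartialMatch db q
      = (PySem.List.sorted (((PySem.Dict.ofList db).items).flatMap (pvG (PySem.Str.lower q)))
          (fun x => x.2.2) true).map (fun x => (x.1, x.2.1)) := by
    rw [← loopA_eq_flatMap]
    rfl
  have hB : findPluginsByPartialMatch_alt db q
      = ([] ++ ((PySem.Dict.ofList db).items).flatMap (pvG2 (PySem.Str.lower q)))
        ++ ([] ++ ((PySem.Dict.ofList db).items).flatMap (pvG1 (PySem.Str.lower q))) := by
    have hpair : findPluginsByPartialMatch_alt db q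
        = (((PySem.Dict.ofList db).items).foldl
            (fun (acc : List (String × List (String × String)) × List (String × List (String × String))) kv =>
          let key := kv.1
          let d := PySem.Dict.ofList kv.2
          if PySem.Str.isIn (PySem.Str.lower q) (PySem.Str.lower key) then (acc.1 ++ [(key, d.items)], acc.2)
          else if PySem.Str.isIn (PySem.Str.lower q) (PySem.Str.lower (d.getD "displayName" key)) then (acc.1, acc.2 ++ [(key, d.items)])
          else acc) ([], [])).1
          ++ (((PySem.Dict.ofList db).items).foldl
            (fun (acc : List (String × List (String × String)) × List (String × List (String × String))) kv =>
          let key := kv.1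
          let d := PySem.Dict.ofList kv.2
          if PySem.Str.isIn (PySem.Str.lower q) (PySem.Str.lower key) then (acc.1 ++ [(key, d.items)], acc.2)
          else if PySem.Str.isIn (PySem.Str.lower q) (PySem.Str.lower (d.getD "displayName" key)) then (acc.1, acc.2 ++ [(key, d.items)])
          else acc) ([], [])).2 := rfl
    rw [hpair, loopB_eq (PySem.Str.lower q) ((PySem.Dict.ofList db).items) [] []]
  rw [hA, hB, sorted_two _ _ (scores_flatMap _ _), List.map_append,
    proj2_flatMap, proj1_flatMap]
  simp
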